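-- pv_equiv track=rewrite | github.com/openthinklabs/Tangent | tangent_code/tangent/ranking/ranking_functions.py | matched_triplets_from_locations
-- ===== SOURCE A (Python) =====
-- def matched_triplets_from_locations(locations, max_window):
--     if len(locations) > 0:
--         min_len = None
--         max_len = None
--         full_locations = {}
--         for loc in locations:
--             current_len = len(loc)
--
--             if min_len is None or current_len < min_len:
--                 min_len = current_len
--             if max_len is None or current_len > max_len:
--                 max_len = current_len
--
--             if current_len in full_locations:
--                 full_locations[current_len].append(loc)
--             else:
--                 full_locations[current_len] = [loc]
--
--         total_triplets = 0
--         # count from children to ancestors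
--         current_len = max_len
--         while current_len > min_len:
--             # check ...
--             if (current_len in full_locations):
--
--                 start_len = min_len if max_window == 0 else max(current_len - max_window, min_len)
--
--                 for ancestor_len in range(start_len, current_len):
--                     # only do test if ancestor appear at this length
--                     if ancestor_len in full_locations:
--                         # for each element at current depth, check if ancestor is in the list
--                         for loc in full_locations[current_len]:
--                             prefix = loc[:ancestor_len]
--
--                             if prefix in full_locations[ancestor_len]:
--                                 total_triplets += 1
--
--             current_len -= 1
--
--         return total_triplets
--     else:
--         return 0
-- ===== SOURCE B (Python) =====
-- def matched_triplets_from_locations(locations, max_window):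
--     # one flat set of all locations; count (child, prefix-length) pairs directly
--     present = set(tuple(loc) for loc in locations)
--     total = 0
--     for loc in locations:
--         n = len(loc)
--         lo = 0 if max_window == 0 else max(n - max_window, 0)
--         for ancestor_len in range(lo, n):
--             if tuple(loc[:ancestor_len]) in present:
--                 total += 1
--     return total
-- ===== Notes on version B (the rewrite author's own statement) =====
-- stated objective: simpler
-- what changed: B drops A's length-grouping dict, the min/max-length pass and the length-driven outer while-loop entirely: it builds one flat set of all locations and, for each location directly, counts the window prefix lengths whose prefix is in that set.
import Mathlib
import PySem

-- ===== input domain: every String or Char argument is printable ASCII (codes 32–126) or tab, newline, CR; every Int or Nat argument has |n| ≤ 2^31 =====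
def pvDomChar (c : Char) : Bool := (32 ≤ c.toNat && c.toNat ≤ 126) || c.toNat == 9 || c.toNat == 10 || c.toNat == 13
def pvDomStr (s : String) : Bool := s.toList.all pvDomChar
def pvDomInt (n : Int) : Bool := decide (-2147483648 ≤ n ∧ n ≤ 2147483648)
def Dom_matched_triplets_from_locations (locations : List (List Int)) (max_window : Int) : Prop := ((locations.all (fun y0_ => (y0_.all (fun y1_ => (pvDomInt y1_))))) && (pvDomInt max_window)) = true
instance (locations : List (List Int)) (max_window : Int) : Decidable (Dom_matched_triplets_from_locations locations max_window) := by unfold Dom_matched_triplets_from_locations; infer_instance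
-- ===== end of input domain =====

-- B replaces A's length-grouping dict, min/max pass and length-driven outer while-loop by one flat
-- set of locations and a direct per-location count of in-window prefixes found in that set (objective: simpler).

-- ===== PORT A =====
-- the single pass of A's first loop: min_len / max_len / full_locations updated together
def pvA_step (s : Option Int × Option Int × PySem.Dict Int (List (List Int))) (loc : List Int) :
    Option Int × Option Int × PySem.Dict Int (List (List Int)) :=
  (
    (match s.1 with
     | none => some (loc.length : Int)
     | some m => if (loc.length : Int) < m then some (loc.length : Int) else some m),
    (match s.2.1 with
     | none => some (loc.length : Int)
     | some m => if (loc.length : Int) > m then some (loc.length : Int) else some m),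
    (if s.2.2.contains (loc.length : Int) then
       s.2.2.modify (loc.length : Int) [] (fun g => g ++ [loc])   -- full_locations[current_len].append(loc)
     else
       s.2.2.insert (loc.length : Int) [loc]))

-- the 'while current_len > min_len' loop carrying 'total'
def pvA_loop (full : PySem.Dict Int (List (List Int))) (min_len max_window total current_len : Int) : Int :=
  if h : current_len > min_len then
    let total :=
      if full.contains current_len then
        let start_len := if max_window = 0 then min_len else max (current_len - max_window) min_len
        (PySem.List.pyRange start_len current_len 1).foldl (fun total ancestor_len =>
          if full.contains ancestor_len then
            -- full_locations[current_len] under the contains guard: getD is exact here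
            (full.getD current_len []).foldl (fun total loc =>
              if (full.getD ancestor_len []).contains (PySem.List.slice loc none (some ancestor_len)) then
                total + 1
              else total) total
          else total) total
      else total
    pvA_loop full min_len max_window total (current_len - 1)
  else total
termination_by (current_len - min_len).toNat
decreasing_by omega

def matched_triplets_from_locations (locations : List (List Int)) (max_window : Int) : Int :=
  if locations.length > 0 then
    match locations.foldl pvA_step (none, none, PySem.Dict.empty) with
    | (some min_len, some max_len, full) => pvA_loop full min_len max_window 0 max_len
    | _ => 0   -- unreachable (locations nonempty): totality guard only
  else 0

-- ===== PORT B =====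
-- tuple(...) in Source B only makes lists hashable; lists are compared by value here directly
def matched_triplets_from_locations_alt (locations : List (List Int)) (max_window : Int) : Int :=
  let present : PySem.Set (List Int) := PySem.Set.ofList locations
  locations.foldl (fun total loc =>
    let n : Int := loc.length
    let lo : Int := if max_window = 0 then 0 else max (n - max_window) 0
    (PySem.List.pyRange lo n 1).foldl (fun t k =>
      if PySem.Set.contains present (PySem.List.slice loc none (some k)) then t + 1 else t) total) 0

-- ===== PRECONDITION & SPEC =====
def Spec_matched_triplets_from_locations (locations : List (List Int)) (max_window : Int) (out : Int) : Prop := out = matched_triplets_from_locations_alt locations max_window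
instance (locations : List (List Int)) (max_window : Int) (out : Int) : Decidable (Spec_matched_triplets_from_locations locations max_window out) := by unfold Spec_matched_triplets_from_locations; infer_instance

-- ===== CLAIM (what is proved, stated in full; the proofs are below) =====
def Claim_equal_matched_triplets_from_locations : Prop := ∀ (locations : List (List Int)) (max_window : Int), Dom_matched_triplets_from_locations locations max_window → Spec_matched_triplets_from_locations locations max_window (matched_triplets_from_locations locations max_window)

-- ===== LEMMAS AND PROOFS =====

-- group of locations of length L, in input order (what full_locations[L] holds)
def pvGrp (locations : List (List Int)) (L : Int) : List (List Int) :=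
  locations.filter (fun l => (l.length : Int) == L)

-- the per-loc inner count shared by both sides
def pvPhi (locations : List (List Int)) (loc : List Int) (a : Int) : Int :=
  if PySem.List.slice loc none (some a) ∈ locations then 1 else 0

-- window starts used by B and by A respectively
def pvLo (max_window n : Int) : Int := if max_window = 0 then 0 else max (n - max_window) 0
def pvStart (min_len max_window L : Int) : Int := if max_window = 0 then min_len else max (L - max_window) min_len

-- per-location window counts of the two programs
def pvFB (locations : List (List Int)) (max_window : Int) (loc : List Int) : Int :=
  ((PySem.List.pyRange (pvLo max_window (loc.length : Int)) (loc.length : Int) 1).map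
    (pvPhi locations loc)).sum
def pvFA (locations : List (List Int)) (min_len max_window : Int) (loc : List Int) : Int :=
  ((PySem.List.pyRange (pvStart min_len max_window (loc.length : Int)) (loc.length : Int) 1).map
    (pvPhi locations loc)).sum

-- ---- facts about the first fold of A ----

theorem pvA_step_split (P : List (List Int)) (s : Option Int × Option Int × PySem.Dict Int (List (List Int))) :
    P.foldl pvA_step s =
      (P.foldl (fun o loc => match o with
          | none => some (loc.length : Int)
          | some m => if (loc.length : Int) < m then some (loc.length : Int) else some m) s.1,
       P.foldl (fun o loc => match o with
          | none => some (loc.length : Int)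
          | some m => if (loc.length : Int) > m then some (loc.length : Int) else some m) s.2.1,
       P.foldl (fun d loc => if d.contains (loc.length : Int) then
            d.modify (loc.length : Int) [] (fun g => g ++ [loc])
          else d.insert (loc.length : Int) [loc]) s.2.2) := by
  induction P generalizing s with
  | nil => rfl
  | cons x t ih => simpa [pvA_step] using ih _

theorem pvMin_le (P : List (List Int)) (o : Option Int) (mn : Int)
    (h : P.foldl (fun o loc => match o with
          | none => some (loc.length : Int)
          | some m => if (loc.length : Int) < m then some (loc.length : Int) else some m) o = some mn) :
    (∀ l ∈ P, mn ≤ (l.length : Int)) ∧ (∀ m, o = some m → mn ≤ m) := by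
  induction P generalizing o with
  | nil => simp_all
  | cons x t ih =>
    simp only [List.foldl_cons] at h
    have := ih _ h
    rcases o with _ | m
    · refine ⟨?_, by simp⟩
      intro l hl
      rcases List.mem_cons.mp hl with hl | hl
      · subst hl; exact this.2 _ rfl
      · exact this.1 _ hl
    · simp only at h this
      by_cases hx : (x.length : Int) < m
      · rw [if_pos hx] at this
        have h2 := this.2 _ rfl
        constructor
        · intro l hl
          rcases List.mem_cons.mp hl with hl | hl
          · subst hl; exact h2
          · exact this.1 _ hl
        · intro m' hm'; cases hm'; omega
      · rw [if_neg hx] at this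
        have h2 := this.2 _ rfl
        constructor
        · intro l hl
          rcases List.mem_cons.mp hl with hl | hl
          · subst hl; omega
          · exact this.1 _ hl
        · intro m' hm'; cases hm'; omega

theorem pvMax_ge (P : List (List Int)) (o : Option Int) (mx : Int)
    (h : P.foldl (fun o loc => match o with
          | none => some (loc.length : Int)
          | some m => if (loc.length : Int) > m then some (loc.length : Int) else some m) o = some mx) :
    (∀ l ∈ P, (l.length : Int) ≤ mx) ∧ (∀ m, o = some m → m ≤ mx) := by
  induction P generalizing o with
  | nil => simp_all
  | cons x t ih =>
    simp only [List.foldl_cons] at h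
    have := ih _ h
    rcases o with _ | m
    · refine ⟨?_, by simp⟩
      intro l hl
      rcases List.mem_cons.mp hl with hl | hl
      · subst hl; exact this.2 _ rfl
      · exact this.1 _ hl
    · simp only at h this
      by_cases hx : (x.length : Int) > m
      · rw [if_pos hx] at this
        have h2 := this.2 _ rfl
        constructor
        · intro l hl
          rcases List.mem_cons.mp hl with hl | hl
          · subst hl; exact h2
          · exact this.1 _ hl
        · intro m' hm'; cases hm'; omega
      · rw [if_neg hx] at this
        have h2 := this.2 _ rfl
        constructor
        · intro l hl
          rcases List.mem_cons.mp hl with hl | hl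
          · subst hl; omega
          · exact this.1 _ hl
        · intro m' hm'; cases hm'; omega

theorem pvMin_mem (P : List (List Int)) (o : Option Int) (mn : Int)
    (h : P.foldl (fun o loc => match o with
          | none => some (loc.length : Int)
          | some m => if (loc.length : Int) < m then some (loc.length : Int) else some m) o = some mn) :
    (o = some mn) ∨ ∃ l ∈ P, (l.length : Int) = mn := by
  induction P generalizing o with
  | nil => simp_all
  | cons x t ih =>
    simp only [List.foldl_cons] at h
    rcases ih _ h with h1 | ⟨l, hl, hlen⟩
    · rcases o with _ | m
      · simp only at h1
        exact Or.inr ⟨x, by simp, Option.some.inj h1⟩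
      · simp only at h1
        by_cases hx : (x.length : Int) < m
        · rw [if_pos hx] at h1
          exact Or.inr ⟨x, by simp, Option.some.inj h1⟩
        · rw [if_neg hx] at h1
          exact Or.inl (by rw [Option.some.inj h1])
    · exact Or.inr ⟨l, by simp [hl], hlen⟩

theorem pvMin_isSome (P : List (List Int)) (m : Int) :
    (P.foldl (fun o loc => match o with
          | none => some (loc.length : Int)
          | some m => if (loc.length : Int) < m then some (loc.length : Int) else some m) (some m)).isSome := by
  induction P generalizing m with
  | nil => simp
  | cons x t ih =>
    simp only [List.foldl_cons]
    by_cases hx : (x.length : Int) < m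
    · simpa [hx] using ih _
    · simpa [hx] using ih _

theorem pvMax_isSome (P : List (List Int)) (m : Int) :
    (P.foldl (fun o loc => match o with
          | none => some (loc.length : Int)
          | some m => if (loc.length : Int) > m then some (loc.length : Int) else some m) (some m)).isSome := by
  induction P generalizing m with
  | nil => simp
  | cons x t ih =>
    simp only [List.foldl_cons]
    by_cases hx : (x.length : Int) > m
    · simpa [hx] using ih _
    · simpa [hx] using ih _

-- the dict fold computes exactly the length groups
theorem pvDict_getD (P : List (List Int)) (d : PySem.Dict Int (List (List Int))) (L : Int) :
    (P.foldl (fun d loc => if d.contains (loc.length : Int) then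
          d.modify (loc.length : Int) [] (fun g => g ++ [loc])
        else d.insert (loc.length : Int) [loc]) d).getD L []
      = d.getD L [] ++ pvGrp P L := by
  induction P generalizing d with
  | nil => simp [pvGrp]
  | cons x t ih =>
    simp only [List.foldl_cons]
    rw [ih]
    have hstep : (if d.contains (x.length : Int) then
          d.modify (x.length : Int) [] (fun g => g ++ [x])
        else d.insert (x.length : Int) [x]).getD L []
        = d.getD L [] ++ (if (x.length : Int) == L then [x] else []) := by
      by_cases hc : d.contains (x.length : Int)
      · rw [if_pos hc, PySem.Dict.getD_modify]
        by_cases he : L = (x.length : Int)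
        · simp [he]
        · simp [he, beq_iff_eq, Ne.symm he]
      · rw [if_neg hc, PySem.Dict.getD_insert]
        by_cases he : L = (x.length : Int)
        · simp [he, PySem.Dict.getD_of_not_contains d _ (by simpa using hc)]
        · simp [he, beq_iff_eq, Ne.symm he]
    rw [hstep, pvGrp, pvGrp, List.filter_cons]
    by_cases he : ((x.length : Int) == L)
    · simp [he, List.append_assoc]
    · simp at he
      simp [he]

theorem pvDict_contains (P : List (List Int)) (d : PySem.Dict Int (List (List Int))) (L : Int) :
    (P.foldl (fun d loc => if d.contains (loc.length : Int) then
          d.modify (loc.length : Int) [] (fun g => g ++ [loc])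
        else d.insert (loc.length : Int) [loc]) d).contains L
      = (d.contains L || P.any (fun l => (l.length : Int) == L)) := by
  induction P generalizing d with
  | nil => simp
  | cons x t ih =>
    simp only [List.foldl_cons]
    rw [ih]
    have hstep : (if d.contains (x.length : Int) then
          d.modify (x.length : Int) [] (fun g => g ++ [x])
        else d.insert (x.length : Int) [x]).contains L
        = (d.contains L || ((x.length : Int) == L)) := by
      by_cases hc : d.contains (x.length : Int) <;>
        [rw [if_pos hc, PySem.Dict.contains_modify]; rw [if_neg hc, PySem.Dict.contains_insert]] <;>
        cases hdc : d.contains L <;> by_cases he : L = (x.length : Int) <;>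
        simp [he] <;> omega
    rw [hstep]
    simp [Bool.or_assoc]

-- ---- the while loop as a sum over the descending length range ----

def pvG (full : PySem.Dict Int (List (List Int))) (min_len max_window L : Int) : Int :=
  if full.contains L then
    ((PySem.List.pyRange (if max_window = 0 then min_len else max (L - max_window) min_len) L 1).map
      (fun a => if full.contains a then
          ((full.getD L []).map (fun loc =>
            if (full.getD a []).contains (PySem.List.slice loc none (some a)) then (1 : Int) else 0)).sum
        else 0)).sum
  else 0

theorem pvA_body (full : PySem.Dict Int (List (List Int))) (min_len max_window total c : Int) :
    (if full.contains c then
        (PySem.List.pyRange (if max_window = 0 then min_len else max (c - max_window) min_len) c 1).foldl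
          (fun total ancestor_len =>
          if full.contains ancestor_len then
            (full.getD c []).foldl (fun total loc =>
              if (full.getD ancestor_len []).contains (PySem.List.slice loc none (some ancestor_len)) then
                total + 1
              else total) total
          else total) total
      else total)
    = total + pvG full min_len max_window c := by
  unfold pvG
  by_cases hc : full.contains c
  · rw [if_pos hc, if_pos hc]
    have hinner : ∀ (R : List Int) (t : Int),
        R.foldl (fun total ancestor_len =>
          if full.contains ancestor_len then
            (full.getD c []).foldl (fun total loc =>
              if (full.getD ancestor_len []).contains (PySem.List.slice loc none (some ancestor_len)) then
                total + 1
              else total) total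
          else total) t
        = t + (R.map (fun a => if full.contains a then
            ((full.getD c []).map (fun loc =>
              if (full.getD a []).contains (PySem.List.slice loc none (some a)) then (1 : Int) else 0)).sum
          else 0)).sum := by
      intro R
      induction R with
      | nil => simp
      | cons a t ih =>
        intro t0
        simp only [List.foldl_cons, List.map_cons, List.sum_cons]
        rw [ih]
        have hstep : (if full.contains a then
              (full.getD c []).foldl (fun total loc =>
                if (full.getD a []).contains (PySem.List.slice loc none (some a)) then
                  total + 1
                else total) t0
            else t0)
            = t0 + (if full.contains a then
              ((full.getD c []).map (fun loc =>
                if (full.getD a []).contains (PySem.List.slice loc none (some a)) then (1 : Int) else 0)).sum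
            else 0) := by
          by_cases ha : full.contains a
          · simp only [if_pos ha]
            rw [PySem.List.foldl_if_add_one (p := fun loc =>
                (full.getD a []).contains (PySem.List.slice loc none (some a)))]
            exact congrArg (t0 + ·) ((PySem.List.sum_map_ite_one_zero
              (fun loc => (full.getD a []).contains (PySem.List.slice loc none (some a)))
              (full.getD c []))).symm
          · simp [ha]
        rw [hstep]
        ring
    rw [hinner]
  · simp [hc]

theorem pvA_loop_sum (full : PySem.Dict Int (List (List Int))) (min_len max_window total c : Int) :
    pvA_loop full min_len max_window total c
      = total + ((PySem.List.pyRange c min_len (-1)).map (pvG full min_len max_window)).sum := by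
  by_cases h : c > min_len
  · rw [pvA_loop]
    rw [dif_pos h]
    rw [PySem.List.pyRange_neg_one_cons (by omega)]
    rw [pvA_loop_sum, pvA_body]
    simp only [List.map_cons, List.sum_cons]
    ring
  · rw [pvA_loop, dif_neg h, PySem.List.pyRange_neg_one_eq_nil (by omega)]
    simp
termination_by (c - min_len).toNat
decreasing_by omega

-- ---- generic sum rearrangements ----

theorem pvSum_swap (R : List Int) (G : List (List Int)) (f : Int → List Int → Int) :
    ((R.map (fun a => (G.map (fun l => f a l)).sum)).sum
      = (G.map (fun l => (R.map (fun a => f a l)).sum)).sum) := by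
  induction R with
  | nil => simp
  | cons a t ih => simp [ih, List.sum_map_add]

theorem pvCountSum (ks : List Int) (c v : Int) :
    (ks.map (fun k => if c = k then v else 0)).sum = (ks.count c : Int) * v := by
  induction ks with
  | nil => simp
  | cons k t ih =>
    simp only [List.map_cons, List.sum_cons, List.count_cons, ih]
    by_cases he : c = k
    · simp [he]
      ring
    · simp [he, Ne.symm he]

theorem pvPartition (ks : List Int) (xs : List (List Int)) (F : List Int → Int) :
    (ks.map (fun k => ((xs.filter (fun l => (l.length : Int) == k)).map F).sum)).sum
      = (xs.map (fun x => ((ks.count (x.length : Int)) : Int) * F x)).sum := by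
  induction xs with
  | nil => simp
  | cons x t ih =>
    have hsplit : ∀ k : Int, (((x :: t).filter (fun l => (l.length : Int) == k)).map F).sum
        = (if (x.length : Int) = k then F x else 0)
          + ((t.filter (fun l => (l.length : Int) == k)).map F).sum := by
      intro k
      rw [List.filter_cons]
      by_cases he : (x.length : Int) = k
      · simp [he]
      · simp [he]
    calc (ks.map (fun k => (((x :: t).filter (fun l => (l.length : Int) == k)).map F).sum)).sum
        = (ks.map (fun k => (if (x.length : Int) = k then F x else 0)
            + ((t.filter (fun l => (l.length : Int) == k)).map F).sum)).sum := by
          exact congrArg List.sum (List.map_congr_left (fun k _ => hsplit k))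
      _ = (ks.map (fun k => if (x.length : Int) = k then F x else 0)).sum
            + (ks.map (fun k => ((t.filter (fun l => (l.length : Int) == k)).map F).sum)).sum := by
          rw [← List.sum_map_add]
      _ = ((ks.count (x.length : Int)) : Int) * F x
            + (t.map (fun y => ((ks.count (y.length : Int)) : Int) * F y)).sum := by
          rw [pvCountSum, ih]
      _ = ((x :: t).map (fun y => ((ks.count (y.length : Int)) : Int) * F y)).sum := by
          simp

theorem pvSum_drop (φ : Int → Int) (sB sA n : Int) (h1 : sB ≤ sA)
    (h0 : ∀ a, sB ≤ a → a < sA → φ a = 0) :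
    ((PySem.List.pyRange sB n 1).map φ).sum = ((PySem.List.pyRange sA n 1).map φ).sum := by
  by_cases h : sA ≤ n
  · rw [PySem.List.pyRange_one_append sB sA n h1 h, List.map_append, List.sum_append]
    have : ((PySem.List.pyRange sB sA 1).map φ).sum = 0 := by
      apply List.sum_eq_zero
      intro y hy
      rcases List.mem_map.mp hy with ⟨a, ha, rfl⟩
      rw [PySem.List.mem_pyRange_one] at ha
      exact h0 a ha.1 ha.2
    rw [this, zero_add]
  · rw [PySem.List.pyRange_one_eq_nil (by omega : n ≤ sA)]
    have : ((PySem.List.pyRange sB n 1).map φ).sum = 0 := by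
      apply List.sum_eq_zero
      intro y hy
      rcases List.mem_map.mp hy with ⟨a, ha, rfl⟩
      rw [PySem.List.mem_pyRange_one] at ha
      exact h0 a ha.1 (by omega)
    rw [this]
    simp

-- ---- membership bridges ----

theorem pvPhi_of_short (locations : List (List Int)) (loc : List Int) (mn a : Int)
    (hmn : ∀ l ∈ locations, mn ≤ (l.length : Int)) (h0 : 0 ≤ a) (hlt : a < mn)
    (_hle : a ≤ (loc.length : Int)) :
    pvPhi locations loc a = 0 := by
  unfold pvPhi
  rw [if_neg]
  intro hmem
  have := hmn _ hmem
  rw [PySem.List.slice_to loc h0] at this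
  simp at this
  omega

theorem pvGrp_contains (locations : List (List Int)) (a : Int) (p : List Int) :
    ((pvGrp locations a).contains p = true) ↔ (p ∈ locations ∧ (p.length : Int) = a) := by
  unfold pvGrp
  rw [List.contains_iff_mem, List.mem_filter]
  simp [beq_iff_eq]

theorem pvSet_contains (locations : List (List Int)) (p : List Int) :
    (PySem.Set.contains (PySem.Set.ofList locations) p = true) ↔ p ∈ locations := by
  simp only [PySem.Set.contains_eq_listContains, List.contains_eq_mem, PySem.Set.mem_ofList,
    decide_eq_true_eq]

-- ---- B as a sum of per-location counts ----

theorem pvPhi_contains (locations : List (List Int)) (loc : List Int) (a : Int) :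
    (if PySem.Set.contains (PySem.Set.ofList locations) (PySem.List.slice loc none (some a)) then (1 : Int) else 0)
      = pvPhi locations loc a := by
  unfold pvPhi
  by_cases h : PySem.List.slice loc none (some a) ∈ locations
  · rw [if_pos ((pvSet_contains _ _).mpr h), if_pos h]
  · rw [if_neg (fun hc => h ((pvSet_contains _ _).mp hc)), if_neg h]

theorem pvB_sum (locations : List (List Int)) (max_window : Int) :
    matched_triplets_from_locations_alt locations max_window
      = (locations.map (pvFB locations max_window)).sum := by
  have hmain : ∀ (P : List (List Int)) (total : Int),
      P.foldl (fun total loc =>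
        (PySem.List.pyRange (if max_window = 0 then 0 else max ((loc.length : Int) - max_window) 0)
            (loc.length : Int) 1).foldl
          (fun t k => if PySem.Set.contains (PySem.Set.ofList locations)
              (PySem.List.slice loc none (some k)) then t + 1 else t) total) total
      = total + (P.map (pvFB locations max_window)).sum := by
    intro P
    induction P with
    | nil => simp
    | cons x t ih =>
      intro total
      simp only [List.foldl_cons, List.map_cons, List.sum_cons]
      rw [ih]
      have hx : (PySem.List.pyRange (if max_window = 0 then 0 else max ((x.length : Int) - max_window) 0)
            (x.length : Int) 1).foldl
          (fun t k => if PySem.Set.contains (PySem.Set.ofList locations)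
              (PySem.List.slice x none (some k)) then t + 1 else t) total
          = total + pvFB locations max_window x := by
        rw [PySem.List.foldl_if_add_one (p := fun k => PySem.Set.contains (PySem.Set.ofList locations)
              (PySem.List.slice x none (some k)))]
        have : pvFB locations max_window x
            = ((PySem.List.pyRange (if max_window = 0 then 0 else max ((x.length : Int) - max_window) 0)
                (x.length : Int) 1).countP (fun k => PySem.Set.contains (PySem.Set.ofList locations)
                  (PySem.List.slice x none (some k))) : Int) := by
          unfold pvFB pvLo
          rw [List.map_congr_left (fun a _ => (pvPhi_contains locations x a).symm)]
          exact PySem.List.sum_map_ite_one_zero _ _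
        rw [this]
      rw [hx]
      ring
  have := hmain locations 0
  rw [zero_add] at this
  exact this

-- ---- A as the same sum ----

theorem pvG_grp (locations : List (List Int)) (full : PySem.Dict Int (List (List Int)))
    (min_len max_window L : Int)
    (hD : ∀ K, full.getD K [] = pvGrp locations K)
    (hC : ∀ K, full.contains K = locations.any (fun l => (l.length : Int) == K))
    (hmn0 : 0 ≤ min_len) :
    pvG full min_len max_window L
      = ((pvGrp locations L).map (pvFA locations min_len max_window)).sum := by
  have hnil : ∀ K, full.contains K = false → pvGrp locations K = [] := by
    intro K hK
    rw [hC K] at hK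
    rw [pvGrp, List.filter_eq_nil_iff]
    intro l hl
    exact (List.any_eq_false.mp hK) l hl
  unfold pvG
  by_cases hc : full.contains L
  · rw [if_pos hc]
    simp only [hD]
    have hterm : ∀ a : Int,
        (if full.contains a then
            ((pvGrp locations L).map (fun loc =>
              if (pvGrp locations a).contains (PySem.List.slice loc none (some a)) then (1 : Int) else 0)).sum
          else 0)
        = ((pvGrp locations L).map (fun loc =>
            if (pvGrp locations a).contains (PySem.List.slice loc none (some a)) then (1 : Int) else 0)).sum := by
      intro a
      by_cases ha : full.contains a
      · rw [if_pos ha]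
      · rw [if_neg ha]
        symm
        apply List.sum_eq_zero
        intro y hy
        rcases List.mem_map.mp hy with ⟨loc, _, rfl⟩
        simp [hnil a (by simpa using ha)]
    rw [List.map_congr_left (fun a _ => hterm a)]
    rw [pvSum_swap]
    apply congrArg List.sum
    apply List.map_congr_left
    intro loc hloc
    have hlenmem := List.mem_filter.mp hloc
    have hmem : loc ∈ locations := hlenmem.1
    have hlen : (loc.length : Int) = L := by simpa [beq_iff_eq] using hlenmem.2
    unfold pvFA pvStart
    rw [hlen]
    apply congrArg List.sum
    apply List.map_congr_left
    intro a ha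
    rw [PySem.List.mem_pyRange_one] at ha
    have hstart : min_len ≤ (if max_window = 0 then min_len else max (L - max_window) min_len) := by
      by_cases h : max_window = 0
      · simp [h]
      · simp only [if_neg h]
        exact le_max_right _ _
    have h0 : 0 ≤ a := by omega
    unfold pvPhi
    by_cases hm : PySem.List.slice loc none (some a) ∈ locations
    · have hslen : (((PySem.List.slice loc none (some a)).length : Int)) = a := by
        rw [PySem.List.slice_to loc h0]
        simp
        omega
      rw [if_pos ((pvGrp_contains _ _ _).mpr ⟨hm, hslen⟩), if_pos hm]
    · rw [if_neg (fun hc2 => hm ((pvGrp_contains _ _ _).mp hc2).1), if_neg hm]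
  · rw [if_neg hc]
    rw [hnil L (by simpa using hc)]
    simp

-- ===== VERDICT (by name: the statement is the Claim_ definition above) =====
theorem pvCount_down (mx mn c : Int) :
    ((PySem.List.pyRange mx mn (-1)).count c : Int) = if mn < c ∧ c ≤ mx then 1 else 0 := by
  by_cases h : mn < c ∧ c ≤ mx
  · rw [if_pos h]
    have hnd : List.Nodup (PySem.List.pyRange mx mn (-1)) := by
      rw [PySem.List.pyRange_neg_one_eq_reverse]
      exact List.nodup_reverse.mpr (PySem.List.nodup_pyRange_one _ _)
    rw [List.count_eq_one_of_mem hnd (PySem.List.mem_pyRange_neg_one.mpr ⟨h.1, h.2⟩)]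
    rfl
  · rw [if_neg h]
    rw [List.count_eq_zero.mpr (fun hm => h (PySem.List.mem_pyRange_neg_one.mp hm))]
    rfl

theorem matched_triplets_from_locations_spec : Claim_equal_matched_triplets_from_locations := by
  intro locations max_window _
  unfold Spec_matched_triplets_from_locations
  cases locations with
  | nil => rfl
  | cons x t =>
    -- the three folds of A's first loop
    obtain ⟨mn, hmn'⟩ := Option.isSome_iff_exists.mp (pvMin_isSome t (x.length : Int))
    obtain ⟨mx, hmx'⟩ := Option.isSome_iff_exists.mp (pvMax_isSome t (x.length : Int))
    have hmnfold : (x :: t).foldl (fun o loc => match o with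
        | none => some (loc.length : Int)
        | some m => if (loc.length : Int) < m then some (loc.length : Int) else some m) none = some mn := by
      simpa using hmn'
    have hmx : (x :: t).foldl (fun o loc => match o with
        | none => some (loc.length : Int)
        | some m => if (loc.length : Int) > m then some (loc.length : Int) else some m) none = some mx := by
      simpa using hmx'
    have hmnle := (pvMin_le _ _ _ hmnfold).1
    have hmxge := (pvMax_ge _ _ _ hmx).1
    have hmn0 : 0 ≤ mn := by
      rcases pvMin_mem _ _ _ hmnfold with h | ⟨l, _, hl⟩
      · cases h
      · omega
    have hD : ∀ K, ((x :: t).foldl (fun d loc => if d.contains (loc.length : Int) then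
          d.modify (loc.length : Int) [] (fun g => g ++ [loc])
        else d.insert (loc.length : Int) [loc]) PySem.Dict.empty).getD K [] = pvGrp (x :: t) K := by
      intro K
      rw [pvDict_getD]
      simp
    have hC : ∀ K, ((x :: t).foldl (fun d loc => if d.contains (loc.length : Int) then
          d.modify (loc.length : Int) [] (fun g => g ++ [loc])
        else d.insert (loc.length : Int) [loc]) PySem.Dict.empty).contains K
        = (x :: t).any (fun l => (l.length : Int) == K) := by
      intro K
      rw [pvDict_contains]
      simp
    rw [matched_triplets_from_locations]
    rw [if_pos (by simp)]
    rw [pvA_step_split, hmnfold, hmx]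
    simp only
    rw [pvA_loop_sum]
    rw [List.map_congr_left (fun L _ => pvG_grp (x :: t) _ mn max_window L hD hC hmn0)]
    have hpart := pvPartition (PySem.List.pyRange mx mn (-1)) (x :: t)
      (pvFA (x :: t) mn max_window)
    rw [show (fun L => ((pvGrp (x :: t) L).map (pvFA (x :: t) mn max_window)).sum)
        = (fun k => (((x :: t).filter (fun l => (l.length : Int) == k)).map
            (pvFA (x :: t) mn max_window)).sum) from rfl, hpart]
    rw [pvB_sum, zero_add]
    apply congrArg List.sum
    apply List.map_congr_left
    intro loc hloc
    have hle := hmnle loc hloc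
    have hge := hmxge loc hloc
    rw [pvCount_down]
    by_cases hlt : mn < (loc.length : Int)
    · rw [if_pos ⟨hlt, hge⟩, one_mul]
      unfold pvFA pvFB
      symm
      apply pvSum_drop
      · -- pvLo ≤ pvStart
        unfold pvLo pvStart
        by_cases h : max_window = 0
        · simp [h]; omega
        · simp only [if_neg h]; omega
      · intro a haB haA
        have h0 : 0 ≤ a := by
          unfold pvLo at haB
          by_cases h : max_window = 0
          · rw [if_pos h] at haB; omega
          · rw [if_neg h] at haB; omega
        have hamn : a < mn := by
          unfold pvStart at haA
          unfold pvLo at haB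
          by_cases h : max_window = 0
          · rw [if_pos h] at haA; omega
          · rw [if_neg h] at haA; rw [if_neg h] at haB; omega
        exact pvPhi_of_short _ loc mn a hmnle h0 hamn (by omega)
    · rw [if_neg (fun hh => hlt hh.1), zero_mul]
      symm
      unfold pvFB
      apply List.sum_eq_zero
      intro y hy
      rcases List.mem_map.mp hy with ⟨a, ha, rfl⟩
      rw [PySem.List.mem_pyRange_one] at ha
      have h0 : 0 ≤ a := by
        unfold pvLo at ha
        by_cases h : max_window = 0
        · rw [if_pos h] at ha; omega
        · rw [if_neg h] at ha; omega
      exact pvPhi_of_short _ loc mn a hmnle h0 (by omega) (by omega)
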